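-- pv_equiv track=rewrite | github.com/kasaiarashi/wgh-helper | wgh/bootstrap.py | _extract_peers_block
-- ===== SOURCE A (Python) =====
-- def _extract_peers_block(existing: str) -> str:
--     """Preserve existing [Peer] stanzas when we rewrite [Interface]."""
--     if not existing:
--         return ""
--     lines = existing.splitlines()
--     out: list[str] = []
--     in_peer = False
--     for line in lines:
--         stripped = line.strip()
--         if stripped.startswith("[Peer]"):
--             in_peer = True
--             out.append(line)
--         elif stripped.startswith("[Interface]"):
--             in_peer = False
--         elif in_peer:
--             out.append(line)
--     return "\n".join(out).strip()
-- ===== SOURCE B (Python) =====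
-- def _extract_peers_block(existing: str) -> str:
--     """Preserve existing [Peer] stanzas when we rewrite [Interface]."""
--     # Pass 1: split the text into header-tagged stanzas (lines before any
--     # header form a dropped preamble).
--     stanzas = []  # list of (is_peer, lines incl. header line)
--     cur = None
--     for line in existing.splitlines():
--         s = line.strip()
--         if s.startswith("[Peer]"):
--             cur = [line]
--             stanzas.append((True, cur))
--         elif s.startswith("[Interface]"):
--             cur = [line]
--             stanzas.append((False, cur))
--         elif cur is not None:
--             cur.append(line)
--     # Pass 2: keep only [Peer] stanzas (header dropped for [Interface] ones).
--     kept = []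
--     for is_peer, lines in stanzas:
--         if is_peer:
--             kept.extend(lines)
--         # [Interface] stanzas (including their header line) are dropped
--     return "\n".join(kept).strip()
-- ===== Notes on version B (the rewrite author's own statement) =====
-- stated objective: alternative
-- what changed: B first splits the text into header-tagged stanzas (carrying their body lines) and then flattens only the [Peer]-tagged stanzas, instead of A's single scan with an in_peer flag; for [Interface] stanzas A skips the header line inside the scan while B collects the stanza and drops it whole.
import Mathlib
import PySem

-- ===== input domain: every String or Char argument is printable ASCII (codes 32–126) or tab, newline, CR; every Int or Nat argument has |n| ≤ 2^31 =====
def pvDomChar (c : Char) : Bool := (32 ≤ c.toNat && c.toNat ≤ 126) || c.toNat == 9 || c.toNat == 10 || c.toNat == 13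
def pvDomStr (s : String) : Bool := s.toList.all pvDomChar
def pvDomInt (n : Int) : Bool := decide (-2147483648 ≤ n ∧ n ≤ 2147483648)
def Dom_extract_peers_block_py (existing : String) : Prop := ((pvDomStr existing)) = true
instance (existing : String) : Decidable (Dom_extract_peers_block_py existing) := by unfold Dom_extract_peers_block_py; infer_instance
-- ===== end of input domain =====

-- B differs from A by decomposition: it splits the text into header-tagged stanzas first,
-- then flattens only the [Peer]-tagged stanzas; same O(n) cost, return values proved equal.

-- ===== PORT A =====
-- A's loop body: state (out, in_peer)
def pvAStep (acc : List String × Bool) (line : String) : List String × Bool :=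
  let stripped := PySem.Str.strip line
  if PySem.Str.startswith stripped "[Peer]" then (acc.1 ++ [line], true)
  else if PySem.Str.startswith stripped "[Interface]" then (acc.1, false)
  else if acc.2 then (acc.1 ++ [line], acc.2)
  else acc

def extract_peers_block_py (existing : String) : String :=
  if existing = "" then ""
  else
    let lines := PySem.Str.splitlines existing
    let st := lines.foldl pvAStep ([], false)
    PySem.Str.strip (PySem.Str.join "\n" st.1)

-- ===== PORT B =====
-- B pass 1 step: stanzas kept in reverse order; appending a body line mutates the head
-- stanza (the functional rendering of Python B's mutation of `cur`, which is the last
-- element of `stanzas`); lines before any header are dropped.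
def pvStanzaStep (rev : List (Bool × List String)) (line : String) : List (Bool × List String) :=
  let s := PySem.Str.strip line
  if PySem.Str.startswith s "[Peer]" then (true, [line]) :: rev
  else if PySem.Str.startswith s "[Interface]" then (false, [line]) :: rev
  else match rev with
    | [] => []
    | (t, ls) :: rest => (t, ls ++ [line]) :: rest

def extract_peers_block_py_alt (existing : String) : String :=
  let stanzas := ((PySem.Str.splitlines existing).foldl pvStanzaStep []).reverse
  let kept := stanzas.foldl (fun acc st => if st.1 then acc ++ st.2 else acc) ([] : List String)
  PySem.Str.strip (PySem.Str.join "\n" kept)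

-- ===== PRECONDITION & SPEC =====
def Spec_extract_peers_block_py (existing : String) (out : String) : Prop := out = extract_peers_block_py_alt existing
instance (existing : String) (out : String) : Decidable (Spec_extract_peers_block_py existing out) := by unfold Spec_extract_peers_block_py; infer_instance

-- ===== CLAIM (what is proved, stated in full; the proofs are below) =====
def Claim_equal_extract_peers_block_py : Prop := ∀ (existing : String), Dom_extract_peers_block_py existing → Spec_extract_peers_block_py existing (extract_peers_block_py existing)

-- ===== LEMMAS AND PROOFS =====

-- the [Peer]-tagged stanza lines, in list order
def pvFlatKept : List (Bool × List String) → List String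
  | [] => []
  | st :: rest => (if st.1 then st.2 else []) ++ pvFlatKept rest

theorem pvFlatKept_append (a b : List (Bool × List String)) :
    pvFlatKept (a ++ b) = pvFlatKept a ++ pvFlatKept b := by
  induction a with
  | nil => simp [pvFlatKept]
  | cons st rest ih => simp [pvFlatKept, ih]

theorem pvKept_foldl (l : List (Bool × List String)) (acc : List String) :
    l.foldl (fun acc st => if st.1 then acc ++ st.2 else acc) acc = acc ++ pvFlatKept l := by
  induction l generalizing acc with
  | nil => simp [pvFlatKept]
  | cons st rest ih =>
    simp only [List.foldl_cons, pvFlatKept, ih]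
    split <;> simp

def pvHeadPeer : List (Bool × List String) → Bool
  | [] => false
  | (t, _) :: _ => t

theorem pvMain (lines : List String) (out : List String) (inp : Bool)
    (rev : List (Bool × List String))
    (h1 : pvFlatKept rev.reverse = out) (h2 : inp = pvHeadPeer rev) :
    (lines.foldl pvAStep (out, inp)).1 = pvFlatKept ((lines.foldl pvStanzaStep rev).reverse) := by
  induction lines generalizing out inp rev with
  | nil => simpa [h2] using h1.symm
  | cons line rest ih =>
    simp only [List.foldl_cons, pvAStep, pvStanzaStep]
    split_ifs with hp hi hinp
    · exact ih (out ++ [line]) true ((true, [line]) :: rev)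
        (by simp [pvFlatKept_append, pvFlatKept, h1]) (by simp [pvHeadPeer])
    · exact ih out false ((false, [line]) :: rev)
        (by simp [pvFlatKept_append, pvFlatKept, h1]) (by simp [pvHeadPeer])
    · -- body line, in_peer = true
      cases rev with
      | nil => simp [pvHeadPeer] at h2; rw [h2] at hinp; exact absurd hinp (by simp)
      | cons st restv =>
        obtain ⟨t, ls⟩ := st
        have ht : t = true := by simp only [pvHeadPeer] at h2; rw [← h2]; exact hinp
        subst ht
        rw [hinp]
        exact ih (out ++ [line]) true ((true, ls ++ [line]) :: restv)
          (by simp [pvFlatKept_append, pvFlatKept] at h1 ⊢; simp [← h1]) (by simp [pvHeadPeer])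
    · -- body line, in_peer = false
      have hinp' : inp = false := by simpa using hinp
      cases rev with
      | nil =>
        exact ih out inp ([] : List (Bool × List String)) h1 (by simp [pvHeadPeer, hinp'])
      | cons st restv =>
        obtain ⟨t, ls⟩ := st
        have ht : t = false := by simp only [pvHeadPeer] at h2; rw [← h2]; exact hinp'
        subst ht
        exact ih out inp ((false, ls ++ [line]) :: restv)
          (by simpa [pvFlatKept_append, pvFlatKept] using h1) (by simp [pvHeadPeer, hinp'])

-- ===== VERDICT (by name: the statement is the Claim_ definition above) =====
theorem extract_peers_block_py_spec : Claim_equal_extract_peers_block_py := by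
  unfold Claim_equal_extract_peers_block_py
  intro existing _
  unfold Spec_extract_peers_block_py extract_peers_block_py extract_peers_block_py_alt
  by_cases he : existing = ""
  · subst he; decide
  · simp only [he, if_false]
    have := pvMain (PySem.Str.splitlines existing) [] false [] (by simp [pvFlatKept]) rfl
    rw [pvKept_foldl]
    simp [this]
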